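-- pv_equiv track=rewrite | github.com/CenZhihan/LLM4AscendC | generator/agent/agent_config.py | model_slug_for_path
-- ===== SOURCE A (Python) =====
-- def model_slug_for_path(model: str) -> str:
--     """将 model 名转为安全的单段目录名（用于 ``output/ascendc/<slug>/...``）。"""
--     s = (model or "").strip() or "unknown"
--     for ch in r'/\:*?"<>| ':
--         s = s.replace(ch, "-")
--     while "--" in s:
--         s = s.replace("--", "-")
--     s = s.strip("-")
--     return s or "unknown"
-- ===== SOURCE B (Python) =====
-- def model_slug_for_path(model: str) -> str:
--     """Single left-to-right pass: split on the separator characters (dash included)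
--     and join the non-empty pieces with single dashes."""
--     s = (model or "").strip() or "unknown"
--     seps = '/\\:*?"<>| -'
--     out = []
--     pending = False
--     for ch in s:
--         if ch in seps:
--             pending = bool(out)
--         else:
--             if pending:
--                 out.append("-")
--                 pending = False
--             out.append(ch)
--     return "".join(out) or "unknown"
-- ===== Notes on version B (the rewrite author's own statement) =====
-- stated objective: alternative
-- what changed: Replaces A's ten sequential character replace passes plus the repeated double-dash collapse loop and final dash strip with a single left-to-right pass that splits on the separator characters (dash included) and joins the non-empty pieces with single dashes.
import Mathlib
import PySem

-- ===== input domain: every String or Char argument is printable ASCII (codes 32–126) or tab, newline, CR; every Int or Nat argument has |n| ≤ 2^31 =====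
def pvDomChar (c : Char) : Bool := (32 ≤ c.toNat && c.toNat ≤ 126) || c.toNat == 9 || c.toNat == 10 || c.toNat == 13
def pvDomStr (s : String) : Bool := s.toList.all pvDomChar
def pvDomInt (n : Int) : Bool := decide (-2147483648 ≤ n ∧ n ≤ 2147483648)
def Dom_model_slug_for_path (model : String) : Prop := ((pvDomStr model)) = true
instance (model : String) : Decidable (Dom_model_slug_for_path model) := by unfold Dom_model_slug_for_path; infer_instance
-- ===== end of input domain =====

-- B replaces A's ten sequential replace passes, repeated double-dash collapse loop and final dash strip
-- by a single left-to-right pass joining the non-separator runs with single dashes (alternative decomposition, not claimed faster).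

-- ===== PORT A =====
def pvBadA : List Char := ['/', '\\', ':', '*', '?', '"', '<', '>', '|', ' ']

-- proof-side model of one replace pass of the collapse loop; needed above the port for its termination proof
def pvPass : List Char → List Char
  | [] => []
  | [c] => [c]
  | a :: b :: t => if a = '-' ∧ b = '-' then '-' :: pvPass t else a :: pvPass (b :: t)

theorem pvPass_length_le (l : List Char) : (pvPass l).length ≤ l.length := by
  fun_induction pvPass l <;> simp_all <;> omega

theorem pvPass_length_lt (l : List Char) (h : ['-', '-'] <:+: l) :
    (pvPass l).length < l.length := by
  fun_induction pvPass l with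
  | case1 => simp at h
  | case2 c => rcases h with ⟨a, b, hab⟩; apply_fun List.length at hab; simp at hab; omega
  | case3 a b t hab ih => simp only [List.length_cons]; have := pvPass_length_le t; omega
  | case4 a b t hab ih =>
      simp only [List.length_cons]
      have : ['-', '-'] <:+: b :: t := by
        rcases (List.infix_cons_iff.mp h) with hp | hi
        · exfalso; rcases hp with ⟨r, hr⟩; simp at hr; exact hab ⟨hr.1.symm, hr.2.1.symm⟩
        · exact hi
      have h2 := ih this; simp only [List.length_cons] at h2; omega

theorem pvReplace_go_eq_pass (fuel : Nat) (l acc : List Char) (h : l.length ≤ fuel) :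
    PySem.Chars.replace.go ['-','-'] ['-'] fuel l acc = acc.reverse ++ pvPass l := by
  induction fuel generalizing l acc with
  | zero =>
    have : l = [] := by cases l <;> simp_all
    subst this; simp [PySem.Chars.replace.go, pvPass]
  | succ n ih =>
    match l with
    | [] => simp [PySem.Chars.replace.go, pvPass]
    | c :: t =>
      rw [PySem.Chars.replace.go]
      by_cases hp : List.isPrefixOf ['-','-'] (c :: t) = true
      · rw [if_pos hp]
        match t, hp with
        | b :: t', hp =>
          have hc : c = '-' ∧ b = '-' := by
            simp [List.isPrefixOf] at hp; exact ⟨hp.1.symm, hp.2.symm⟩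
          obtain ⟨rfl, rfl⟩ := hc
          rw [ih _ _ (by simp at h ⊢; omega)]
          simp [pvPass]
        | [], hp => simp [List.isPrefixOf] at hp
      · rw [if_neg hp]
        rw [ih _ _ (by simp at h ⊢; omega)]
        match t with
        | [] => simp [pvPass]
        | b :: t' =>
          have : ¬ (c = '-' ∧ b = '-') := by
            rintro ⟨rfl, rfl⟩; simp [List.isPrefixOf] at hp
          simp [pvPass, this]

theorem pvReplace_dd (l : List Char) :
    PySem.Chars.replace l ['-','-'] ['-'] = pvPass l := by
  rw [PySem.Chars.replace]
  simp only [List.isEmpty_cons, if_false, Bool.false_eq_true]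
  exact pvReplace_go_eq_pass l.length l [] le_rfl

-- the double-dash collapse while-loop of A
def pvCollapse (l : List Char) : List Char :=
  if _hin : PySem.Chars.isIn ['-','-'] l = true then
    pvCollapse (PySem.Chars.replace l ['-','-'] ['-'])
  else l
termination_by l.length
decreasing_by
  rw [pvReplace_dd]
  exact pvPass_length_lt l ((PySem.Chars.isIn_iff_infix _ _).mp _hin)

def model_slug_for_path (model : String) : String :=
  let s0 := PySem.Chars.strip model.toList
  let s1 := if s0 = [] then "unknown".toList else s0
  let s2 := pvBadA.foldl (fun s ch => PySem.Chars.replace s [ch] ['-']) s1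
  let s3 := pvCollapse s2
  let s4 := PySem.Chars.stripChars s3 ['-']
  if s4 = [] then "unknown" else String.ofList s4

-- ===== PORT B =====
def pvSeps : List Char := ['/', '\\', ':', '*', '?', '"', '<', '>', '|', ' ', '-']

-- one iteration of Source B's loop body on the state (out, pending)
def pvStep (st : List Char × Bool) (ch : Char) : List Char × Bool :=
  if pvSeps.contains ch then (st.1, decide (st.1 ≠ []))
  else (st.1 ++ (if st.2 then ['-'] else []) ++ [ch], false)

def model_slug_for_path_alt (model : String) : String :=
  let s0 := PySem.Chars.strip model.toList
  let s1 := if s0 = [] then "unknown".toList else s0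
  let r := s1.foldl pvStep ([], false)
  if r.1 = [] then "unknown" else String.ofList r.1

-- ===== PRECONDITION & SPEC =====
def Spec_model_slug_for_path (model : String) (out : String) : Prop := out = model_slug_for_path_alt model
instance (model : String) (out : String) : Decidable (Spec_model_slug_for_path model out) := by unfold Spec_model_slug_for_path; infer_instance

-- ===== CLAIM (what is proved, stated in full; the proofs are below) =====
def Claim_equal_model_slug_for_path : Prop := ∀ (model : String), Dom_model_slug_for_path model → Spec_model_slug_for_path model (model_slug_for_path model)

-- ===== LEMMAS AND PROOFS =====

-- the composite effect of A's ten single-character replaces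
def pvF (c : Char) : Char := if pvBadA.contains c then '-' else c

-- collapse of dash runs (the fixpoint of pvPass)
def pvCanon : List Char → List Char
  | [] => []
  | [c] => [c]
  | a :: b :: t => if a = '-' ∧ b = '-' then pvCanon (b :: t) else a :: pvCanon (b :: t)

-- spec of Source B's loop on the mapped alphabet ('-' is the only separator)
def pvRun : Bool → List Char → List Char
  | _, [] => []
  | p, c :: t => if c = '-' then pvRun true t else (if p then ['-'] else []) ++ c :: pvRun false t

def pvLead : List Char → List Char
  | [] => []
  | c :: t => if c = '-' then pvLead t else c :: pvRun false t

-- spec of Source B's loop on the original alphabet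
def pvRunS : Bool → List Char → List Char
  | _, [] => []
  | p, c :: t => if pvSeps.contains c then pvRunS true t else (if p then ['-'] else []) ++ c :: pvRunS false t

def pvLeadS : List Char → List Char
  | [] => []
  | c :: t => if pvSeps.contains c then pvLeadS t else c :: pvRunS false t

def pvRstrip (y : List Char) : List Char := (List.dropWhile (fun c => c == '-') y.reverse).reverse

theorem pvReplaceSingle_go (a b : Char) (fuel : Nat) (l acc : List Char) (h : l.length ≤ fuel) :
    PySem.Chars.replace.go [a] [b] fuel l acc
      = acc.reverse ++ l.map (fun c => if c = a then b else c) := by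
  induction fuel generalizing l acc with
  | zero =>
    have : l = [] := by cases l <;> simp_all
    subst this; simp [PySem.Chars.replace.go]
  | succ n ih =>
    match l with
    | [] => simp [PySem.Chars.replace.go]
    | c :: t =>
      rw [PySem.Chars.replace.go]
      by_cases hp : List.isPrefixOf [a] (c :: t) = true
      · have hac : c = a := by simp [List.isPrefixOf] at hp; exact hp.symm
        subst hac
        rw [if_pos hp]
        rw [ih _ _ (by simp at h ⊢; omega)]
        simp
      · have hac : ¬ c = a := by
          intro h'; subst h'; simp [List.isPrefixOf] at hp
        rw [if_neg hp]
        rw [ih _ _ (by simp at h ⊢; omega)]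
        simp [hac]

theorem pvReplace_single (a b : Char) (s : List Char) :
    PySem.Chars.replace s [a] [b] = s.map (fun c => if c = a then b else c) := by
  rw [PySem.Chars.replace]
  simp only [List.isEmpty_cons, if_false, Bool.false_eq_true]
  exact pvReplaceSingle_go a b s.length s [] le_rfl

set_option maxHeartbeats 1000000 in
theorem pvFoldBad (s : List Char) :
    pvBadA.foldl (fun s ch => PySem.Chars.replace s [ch] ['-']) s = s.map pvF := by
  simp only [pvBadA, List.foldl_cons, List.foldl_nil, pvReplace_single, List.map_map]
  refine List.map_congr_left ?_
  intro c _
  by_cases h : pvBadA.contains c = true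
  · simp only [pvBadA, List.contains_eq_mem, decide_eq_true_eq, List.mem_cons,
      List.not_mem_nil, or_false] at h
    rcases h with rfl | rfl | rfl | rfl | rfl | rfl | rfl | rfl | rfl | rfl <;> rfl
  · have hm : c ∉ pvBadA := by simpa [List.contains_eq_mem] using h
    have h' : pvF c = c := by simp [pvF, hm]
    rw [h']
    simp only [pvBadA, List.contains_eq_mem, decide_eq_true_eq, List.mem_cons,
      List.not_mem_nil, or_false] at h
    push Not at h
    obtain ⟨h1, h2, h3, h4, h5, h6, h7, h8, h9, h10⟩ := h
    simp only [Function.comp_def]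
    simp [h1, h2, h3, h4, h5, h6, h7, h8, h9, h10]

theorem pvPass_cons_of_ne {b : Char} (t : List Char) (hb : b ≠ '-') :
    pvPass (b :: t) = b :: pvPass t := by
  cases t with
  | nil => simp [pvPass]
  | cons c u => simp [pvPass, hb]

theorem pvCanon_cons_of_ne {a : Char} (x : List Char) (ha : a ≠ '-') :
    pvCanon (a :: x) = a :: pvCanon x := by
  cases x with
  | nil => simp [pvCanon]
  | cons c u => simp [pvCanon, ha]

theorem pvCanon_dash_cons (x : List Char) :
    pvCanon ('-' :: x) = '-' :: pvCanon (List.dropWhile (fun c => c == '-') x) := by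
  induction x with
  | nil => simp [pvCanon]
  | cons c u ih =>
    by_cases hc : c = '-'
    · subst hc
      rw [show pvCanon ('-' :: '-' :: u) = pvCanon ('-' :: u) by simp [pvCanon]]
      simpa using ih
    · simp [pvCanon, hc]

theorem pvDropWhile_pass (t : List Char) :
    List.dropWhile (fun c => c == '-') (pvPass t) = pvPass (List.dropWhile (fun c => c == '-') t) := by
  fun_induction pvPass t with
  | case1 => simp [pvPass]
  | case2 c =>
    by_cases hc : c = '-'
    · subst hc; simp [pvPass]
    · simp [pvPass, hc]
  | case3 a b t hab ih =>
    obtain ⟨rfl, rfl⟩ := hab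
    simpa using ih
  | case4 a b t hab ih =>
    by_cases ha : a = '-'
    · subst ha
      have hb : b ≠ '-' := fun h => hab ⟨rfl, h⟩
      rw [pvPass_cons_of_ne _ hb]
      simp [hb, pvPass_cons_of_ne _ hb]
    · simp [ha, pvPass]

theorem pvCanon_pass : ∀ l : List Char, pvCanon (pvPass l) = pvCanon l := by
  intro l
  induction hn : l.length using Nat.strong_induction_on generalizing l with
  | _ n ih =>
  subst hn
  match l with
  | [] => rfl
  | [c] => rfl
  | a :: b :: t =>
    by_cases hab : a = '-' ∧ b = '-'
    · obtain ⟨rfl, rfl⟩ := hab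
      rw [show pvPass ('-' :: '-' :: t) = '-' :: pvPass t by simp [pvPass]]
      rw [pvCanon_dash_cons, pvDropWhile_pass]
      rw [ih _ (by have := List.length_dropWhile_le (fun c => c == '-') t; simp only [List.length_cons]; omega) _ rfl]
      rw [show pvCanon ('-' :: '-' :: t) = pvCanon ('-' :: t) by simp [pvCanon]]
      rw [pvCanon_dash_cons]
    · rw [show pvPass (a :: b :: t) = a :: pvPass (b :: t) by simp [pvPass, hab]]
      by_cases ha : a = '-'
      · subst ha
        have hb : b ≠ '-' := fun h => hab ⟨rfl, h⟩
        rw [pvPass_cons_of_ne _ hb]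
        have hdb : List.dropWhile (fun c => c == '-') (b :: pvPass t) = b :: pvPass t := by simp [hb]
        have hdb2 : List.dropWhile (fun c => c == '-') (b :: t) = b :: t := by simp [hb]
        rw [pvCanon_dash_cons, pvCanon_dash_cons, hdb, hdb2,
          pvCanon_cons_of_ne _ hb, pvCanon_cons_of_ne _ hb, ih t.length (by simp) t rfl]
      · rw [pvCanon_cons_of_ne _ ha, pvCanon_cons_of_ne _ ha]
        rw [ih (b :: t).length (by simp) (b :: t) rfl]

theorem pvCanon_eq_self : ∀ l : List Char, ¬ ['-','-'] <:+: l → pvCanon l = l := by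
  intro l h
  fun_induction pvCanon l with
  | case1 => rfl
  | case2 c => rfl
  | case3 a b t hab ih =>
    exfalso; obtain ⟨rfl, rfl⟩ := hab
    exact h ⟨[], t, rfl⟩
  | case4 a b t hab ih =>
    have : ¬ ['-','-'] <:+: b :: t := fun hi => h (hi.trans (List.suffix_cons a (b :: t)).isInfix)
    rw [ih this]

theorem pvCollapse_eq_canon (l : List Char) : pvCollapse l = pvCanon l := by
  induction hn : l.length using Nat.strong_induction_on generalizing l with
  | _ n ih =>
  subst hn
  rw [pvCollapse]
  split_ifs with h
  · rw [pvReplace_dd]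
    have hlt := pvPass_length_lt l ((PySem.Chars.isIn_iff_infix _ _).mp h)
    rw [ih _ hlt _ rfl, pvCanon_pass]
  · have h' : ¬ ['-','-'] <:+: l := by
      rw [← PySem.Chars.isIn_iff_infix]; simpa using h
    exact (pvCanon_eq_self l h').symm

theorem pvDropWhile_head {p : Char → Bool} {c : Char} {v : List Char} :
    ∀ u : List Char, List.dropWhile p u = c :: v → p c = false := by
  intro u h
  induction u with
  | nil => simp at h
  | cons a t ih =>
    rw [List.dropWhile_cons] at h
    by_cases ha : p a
    · simp [ha] at h; exact ih h
    · simp [ha] at h; rw [← h.1]; simpa using ha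

theorem pvRstrip_cons_of_ne {a : Char} (y : List Char) (ha : a ≠ '-') :
    pvRstrip (a :: y) = a :: pvRstrip y := by
  unfold pvRstrip
  rw [List.reverse_cons, List.dropWhile_append]
  by_cases h : (List.dropWhile (fun c => c == '-') y.reverse).isEmpty
  · have h0 : List.dropWhile (fun c => c == '-') y.reverse = [] := by
      simpa [List.isEmpty_iff] using h
    simp [h0, ha]
  · simp [h]

theorem pvRstrip_cons_of_ne_nil (a : Char) (y : List Char) (hy : pvRstrip y ≠ []) :
    pvRstrip (a :: y) = a :: pvRstrip y := by
  unfold pvRstrip at *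
  rw [List.reverse_cons, List.dropWhile_append]
  have h : (List.dropWhile (fun c => c == '-') y.reverse).isEmpty = false := by
    rcases hx : List.dropWhile (fun c => c == '-') y.reverse with _ | ⟨c, v⟩
    · exfalso; apply hy; rw [hx]; rfl
    · simp
  simp [h]

theorem pvRun_true_dropWhile (u : List Char) :
    pvRun true (List.dropWhile (fun c => c == '-') u) = pvRun true u := by
  induction u with
  | nil => rfl
  | cons c t ih =>
    by_cases hc : c = '-'
    · subst hc; simpa [pvRun] using ih
    · simp [pvRun, hc]

theorem pvRstrip_canon : ∀ t : List Char, pvRstrip (pvCanon t) = pvRun false t := by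
  intro t
  induction hn : t.length using Nat.strong_induction_on generalizing t with
  | _ n ih =>
  subst hn
  match t with
  | [] => rfl
  | c :: u =>
    by_cases hc : c = '-'
    · subst hc
      rw [pvCanon_dash_cons]
      rcases hx : List.dropWhile (fun c => c == '-') u with _ | ⟨d, v⟩
      · rw [show pvCanon [] = [] from rfl]
        rw [show pvRun false ('-' :: u) = pvRun true u from rfl]
        rw [← pvRun_true_dropWhile u, hx]
        rfl
      · have hd : d ≠ '-' := by
          have := pvDropWhile_head u hx; simpa using this
        rw [pvCanon_cons_of_ne _ hd]
        have hne : pvRstrip (d :: pvCanon v) ≠ [] := by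
          rw [pvRstrip_cons_of_ne _ hd]; simp
        rw [pvRstrip_cons_of_ne_nil _ _ hne, pvRstrip_cons_of_ne _ hd]
        have hlv : v.length < u.length + 1 := by
          have hle := List.length_dropWhile_le (fun c => c == '-') u
          rw [hx] at hle; simp at hle; omega
        rw [ih v.length (by simpa using hlv) v rfl]
        rw [show pvRun false ('-' :: u) = pvRun true u from rfl]
        rw [← pvRun_true_dropWhile u, hx]
        simp [pvRun, hd]
    · rw [pvCanon_cons_of_ne _ hc, pvRstrip_cons_of_ne _ hc]
      rw [ih u.length (by simp) u rfl]
      simp [pvRun, hc]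

theorem pvLead_dropWhile (t : List Char) :
    pvLead (List.dropWhile (fun c => c == '-') t) = pvLead t := by
  induction t with
  | nil => rfl
  | cons c u ih =>
    by_cases hc : c = '-'
    · subst hc; simpa [pvLead] using ih
    · simp [pvLead, hc]

theorem pvStripChars_eq (s : List Char) :
    PySem.Chars.stripChars s ['-'] = pvRstrip (List.dropWhile (fun c => c == '-') s) := by
  have hp : (fun c => List.contains ['-'] c) = (fun c => c == '-') := by
    funext c; cases h : (c == '-') <;> simp_all [List.contains_eq_mem]
  rw [PySem.Chars.stripChars]
  simp only [hp]
  rfl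

theorem pvStrip_canon : ∀ m : List Char, PySem.Chars.stripChars (pvCanon m) ['-'] = pvLead m := by
  intro m
  induction hn : m.length using Nat.strong_induction_on generalizing m with
  | _ n ih =>
  subst hn
  rw [pvStripChars_eq]
  match m with
  | [] => rfl
  | c :: t =>
    by_cases hc : c = '-'
    · subst hc
      rw [pvCanon_dash_cons]
      rw [show List.dropWhile (fun c => c == '-') ('-' :: pvCanon (List.dropWhile (fun c => c == '-') t))
            = List.dropWhile (fun c => c == '-') (pvCanon (List.dropWhile (fun c => c == '-') t)) by simp]
      have hlen : (List.dropWhile (fun c => c == '-') t).length < t.length + 1 := by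
        have := List.length_dropWhile_le (fun c => c == '-') t; omega
      have := ih _ (by simpa using hlen) (List.dropWhile (fun c => c == '-') t) rfl
      rw [pvStripChars_eq] at this
      rw [this, pvLead_dropWhile]
      rfl
    · rw [pvCanon_cons_of_ne _ hc]
      rw [show List.dropWhile (fun c => c == '-') (c :: pvCanon t) = c :: pvCanon t by simp [hc]]
      rw [pvRstrip_cons_of_ne _ hc, pvRstrip_canon]
      simp [pvLead, hc]

theorem pvSeps_pos {c : Char} (h : pvSeps.contains c = true) : pvF c = '-' := by
  simp only [pvSeps, List.contains_eq_mem, decide_eq_true_eq, List.mem_cons,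
    List.not_mem_nil, or_false] at h
  rcases h with rfl | rfl | rfl | rfl | rfl | rfl | rfl | rfl | rfl | rfl | rfl <;> rfl

theorem pvSeps_neg {c : Char} (h : pvSeps.contains c = false) : pvF c = c ∧ c ≠ '-' := by
  simp only [pvSeps, List.contains_eq_mem, decide_eq_false_iff_not, List.mem_cons,
    List.not_mem_nil, or_false] at h
  push Not at h
  obtain ⟨h1, h2, h3, h4, h5, h6, h7, h8, h9, h10, h11⟩ := h
  refine ⟨?_, h11⟩
  simp [pvF, pvBadA, h1, h2, h3, h4, h5, h6, h7, h8, h9, h10]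

theorem pvRunS_eq (p : Bool) (cs : List Char) : pvRunS p cs = pvRun p (cs.map pvF) := by
  induction cs generalizing p with
  | nil => rfl
  | cons c t ih =>
    by_cases h : pvSeps.contains c = true
    · have hm : c ∈ pvSeps := by simpa [List.contains_eq_mem] using h
      rw [show pvRunS p (c :: t) = pvRunS true t by simp [pvRunS, hm]]
      rw [List.map_cons, pvSeps_pos h]
      rw [show pvRun p ('-' :: t.map pvF) = pvRun true (t.map pvF) by simp [pvRun]]
      exact ih true
    · have h' := pvSeps_neg (by simpa using h)
      have hm : c ∉ pvSeps := by simpa [List.contains_eq_mem] using h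
      rw [show pvRunS p (c :: t) = (if p then ['-'] else []) ++ c :: pvRunS false t by
        simp [pvRunS, hm]]
      rw [List.map_cons, h'.1]
      rw [show pvRun p (c :: t.map pvF) = (if p then ['-'] else []) ++ c :: pvRun false (t.map pvF) by
        simp [pvRun, h'.2]]
      rw [ih false]

theorem pvLeadS_eq (cs : List Char) : pvLeadS cs = pvLead (cs.map pvF) := by
  induction cs with
  | nil => rfl
  | cons c t ih =>
    by_cases h : pvSeps.contains c = true
    · have hm : c ∈ pvSeps := by simpa [List.contains_eq_mem] using h
      rw [show pvLeadS (c :: t) = pvLeadS t by simp [pvLeadS, hm]]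
      rw [List.map_cons, pvSeps_pos h]
      rw [show pvLead ('-' :: t.map pvF) = pvLead (t.map pvF) by simp [pvLead]]
      exact ih
    · have h' := pvSeps_neg (by simpa using h)
      have hm : c ∉ pvSeps := by simpa [List.contains_eq_mem] using h
      rw [show pvLeadS (c :: t) = c :: pvRunS false t by simp [pvLeadS, hm]]
      rw [List.map_cons, h'.1]
      rw [show pvLead (c :: t.map pvF) = c :: pvRun false (t.map pvF) by simp [pvLead, h'.2]]
      rw [pvRunS_eq]

theorem pvFoldl_inv (t : List Char) (out : List Char) (p : Bool) (h : out ≠ []) :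
    (List.foldl pvStep (out, p) t).1 = out ++ pvRunS p t := by
  induction t generalizing out p with
  | nil => simp [pvRunS]
  | cons c u ih =>
    by_cases hc : pvSeps.contains c = true
    · have hm : c ∈ pvSeps := by simpa [List.contains_eq_mem] using hc
      rw [List.foldl_cons]
      rw [show pvStep (out, p) c = (out, decide (out ≠ [])) by simp [pvStep, hm]]
      rw [show decide (out ≠ []) = true by simpa using h]
      rw [ih out true h]
      simp [pvRunS, hm]
    · have hm : c ∉ pvSeps := by simpa [List.contains_eq_mem] using hc
      rw [List.foldl_cons]
      rw [show pvStep (out, p) c = (out ++ (if p then ['-'] else []) ++ [c], false) by simp [pvStep, hm]]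
      rw [ih _ false (by simp)]
      simp [pvRunS, hm]

theorem pvFoldl_lead (t : List Char) :
    (List.foldl pvStep ([], false) t).1 = pvLeadS t := by
  induction t with
  | nil => rfl
  | cons c u ih =>
    by_cases hc : pvSeps.contains c = true
    · have hm : c ∈ pvSeps := by simpa [List.contains_eq_mem] using hc
      rw [List.foldl_cons]
      rw [show pvStep (([] : List Char), false) c = ([], false) by simp [pvStep, hm]]
      rw [ih]
      simp [pvLeadS, hm]
    · have hm : c ∉ pvSeps := by simpa [List.contains_eq_mem] using hc
      rw [List.foldl_cons]
      rw [show pvStep (([] : List Char), false) c = ([c], false) by simp [pvStep, hm]]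
      rw [pvFoldl_inv u [c] false (by simp)]
      simp [pvLeadS, hm]

theorem pvMain (s : List Char) :
    PySem.Chars.stripChars (pvCollapse (pvBadA.foldl (fun s ch => PySem.Chars.replace s [ch] ['-']) s)) ['-']
      = (List.foldl pvStep ([], false) s).1 := by
  rw [pvFoldBad, pvCollapse_eq_canon, pvStrip_canon, pvFoldl_lead, pvLeadS_eq]

-- ===== VERDICT (by name: the statement is the Claim_ definition above) =====
theorem model_slug_for_path_spec : Claim_equal_model_slug_for_path := by
  intro model _
  unfold Spec_model_slug_for_path model_slug_for_path model_slug_for_path_alt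
  simp only []
  rw [pvMain]
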